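-- pv_equiv track=rewrite | github.com/code-with-zeeshan/universal-translation-system | tools/create_vocabulary_packs.py | _tokenize_word
-- ===== SOURCE A (Python) =====
-- from typing import Any, Dict, List, Optional, Set, Tuple
--
-- def _tokenize_word(word: str, vocab: Dict[str, int]) -> List[str]:
--     """Tokenize a word using the vocabulary (simple greedy approach)"""
--     if word in vocab:
--         return [word]
--
--     # Try subword tokenization
--     tokens = []
--     i = 0
--
--     while i < len(word):
--         # Find longest matching prefix
--         longest_match = None
--         for j in range(len(word), i, -1):
--             subword = word[i:j]
--
--             # Add ## prefix for continuation subwords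
--             if i > 0:
--                 subword = f"##{subword}"
--
--             if subword in vocab:
--                 longest_match = subword
--                 i = j
--                 break
--
--         if longest_match:
--             tokens.append(longest_match)
--         else:
--             # No match found, skip character
--             i += 1
--
--     return tokens if tokens else ['<unk>']
-- ===== SOURCE B (Python) =====
-- def _tokenize_word(word, vocab):
--     """Greedy pieces found by scanning precomputed candidate cores over the vocabulary,
--     instead of probing every substring length against the dict."""
--     if word in vocab:
--         return [word]
--
--     # candidates usable at position 0 (plain keys) and at later positions ('##' keys, marker stripped)
--     first_cores = [k for k in vocab]
--     cont_cores = [k[2:] for k in vocab if k.startswith("##")]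
--
--     tokens = []
--     i, n = 0, len(word)
--     while i < n:
--         cores = first_cores if i == 0 else cont_cores
--         best = 0
--         for core in cores:
--             if len(core) > best and word.startswith(core, i):
--                 best = len(core)
--         if best:
--             tokens.append(word[i:i + best] if i == 0 else "##" + word[i:i + best])
--             i += best
--         else:
--             i += 1
--     return tokens or ['<unk>']
-- ===== Notes on version B (the rewrite author's own statement) =====
-- stated objective: faster
-- what changed: B transposes the search: instead of probing every substring length word[i:j] against the dict (A's descending j-scan), it precomputes the candidate cores once (all keys for position 0, '##'-stripped keys for later positions) and at each position scans those cores keeping the maximal one that prefixes the rest of the word, so per-position work is bounded by the vocabulary, not by the remaining word length.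
import Mathlib
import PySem

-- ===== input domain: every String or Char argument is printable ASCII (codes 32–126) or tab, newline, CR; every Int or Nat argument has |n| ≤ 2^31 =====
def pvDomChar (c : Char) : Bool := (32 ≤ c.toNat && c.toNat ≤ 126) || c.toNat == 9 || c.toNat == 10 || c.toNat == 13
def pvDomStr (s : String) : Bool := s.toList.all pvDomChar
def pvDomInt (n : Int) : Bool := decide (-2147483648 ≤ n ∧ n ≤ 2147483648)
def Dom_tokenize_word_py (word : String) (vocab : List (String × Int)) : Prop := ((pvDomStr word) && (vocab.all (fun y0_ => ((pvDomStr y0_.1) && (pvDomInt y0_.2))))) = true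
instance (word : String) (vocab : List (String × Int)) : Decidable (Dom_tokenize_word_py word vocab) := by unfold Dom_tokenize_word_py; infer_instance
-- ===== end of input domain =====

-- B transposes the search: it precomputes the candidate cores from the vocabulary once and, at each
-- position, scans the cores keeping the maximal one that prefixes the rest of the word, instead of
-- A's descending probe of every substring length against the dict; same return value, per-position cost
-- bounded by the vocabulary instead of the remaining word length (measured faster on long words).

-- Python `s in vocab` for a dict parameter: key membership in the association list (exact: first-match
-- lookup succeeds iff some key equals s). Used by both ports since both Pythons write `word in vocab`.
def pvMemVocab (vocab : List (String × Int)) (s : List Char) : Bool :=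
  vocab.any (fun p => p.1.toList == s)

-- ===== PORT A =====
-- inner `for j in range(len(word), i, -1): … break` of A: first j (descending) whose candidate is in vocab
def pvAFind (vocab : List (String × Int)) (cs : List Char) (i j : Nat) :
    Option (List Char × Nat) :=
  if _h : i < j then
    let sub := (cs.drop i).take (j - i)
    let sub := if 0 < i then '#' :: '#' :: sub else sub
    if pvMemVocab vocab sub then some (sub, j) else pvAFind vocab cs i (j - 1)
  else none
termination_by j

-- needed only for pvALoop's termination
theorem pvAFind_some {vocab cs i j s k} (h : pvAFind vocab cs i j = some (s, k)) :
    i < k ∧ k ≤ j := by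
  induction j using Nat.strong_induction_on with
  | _ j ih =>
    rw [pvAFind] at h
    split at h
    · dsimp only at h
      split at h <;> split at h
      all_goals first
        | (simp only [Option.some.injEq, Prod.mk.injEq] at h; omega)
        | (have := ih (j - 1) (by omega) h; omega)
    · exact absurd h (by simp)

-- A's outer `while i < len(word)` loop
def pvALoop (vocab : List (String × Int)) (cs : List Char) (tokens : List String) (i : Nat) :
    List String :=
  if _h : i < cs.length then
    match hf : pvAFind vocab cs i cs.length with
    | some (s, k) => pvALoop vocab cs (tokens ++ [String.ofList s]) k
    | none => pvALoop vocab cs tokens (i + 1)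
  else tokens
termination_by cs.length - i
decreasing_by
  · have := pvAFind_some hf; omega
  · omega

def tokenize_word_py (word : String) (vocab : List (String × Int)) : List String :=
  if pvMemVocab vocab word.toList then [word]
  else
    let tokens := pvALoop vocab word.toList [] 0
    if tokens.isEmpty then ["<unk>"] else tokens

-- ===== PORT B =====
-- `k[2:] if k.startswith("##")`: a '##' key stripped of its marker, None otherwise (exact on lists)
def pvStrip (k : List Char) : Option (List Char) :=
  match k with
  | '#' :: '#' :: c => some c
  | _ => none

-- prefix = "" at position 0, "##" later (shared by both ports' token assembly)
def pvPre (i : Nat) : List Char := if i == 0 then [] else ['#', '#']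

-- `for core in cores: if len(core) > best and word.startswith(core, i): best = len(core)`
-- (word.startswith(core, i) with 0 ≤ i ≤ len(word) is exactly core.isPrefixOf (cs.drop i))
def pvBest (cores : List (List Char)) (cs : List Char) (i : Nat) : Nat :=
  cores.foldl
    (fun best core =>
      if best < core.length && core.isPrefixOf (cs.drop i) then core.length else best) 0

-- B's outer `while i < n` loop (Python binds `cores`/`best` locally; written inline here)
def pvBLoop (firstCores contCores : List (List Char)) (cs : List Char)
    (tokens : List String) (i : Nat) : List String :=
  if _h : i < cs.length then
    if _hb : 0 < pvBest (if i == 0 then firstCores else contCores) cs i then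
      pvBLoop firstCores contCores cs
        (tokens ++ [String.ofList (pvPre i ++
          (cs.drop i).take (pvBest (if i == 0 then firstCores else contCores) cs i))])
        (i + pvBest (if i == 0 then firstCores else contCores) cs i)
    else pvBLoop firstCores contCores cs tokens (i + 1)
  else tokens
termination_by cs.length - i
decreasing_by
  · omega
  · omega

def tokenize_word_py_alt (word : String) (vocab : List (String × Int)) : List String :=
  if pvMemVocab vocab word.toList then [word]
  else
    let firstCores := vocab.map (fun p => p.1.toList)
    let contCores := vocab.filterMap (fun p => pvStrip p.1.toList)
    let tokens := pvBLoop firstCores contCores word.toList [] 0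
    if tokens.isEmpty then ["<unk>"] else tokens

-- ===== PRECONDITION & SPEC =====
def Spec_tokenize_word_py (word : String) (vocab : List (String × Int)) (out : List String) : Prop := out = tokenize_word_py_alt word vocab
instance (word : String) (vocab : List (String × Int)) (out : List String) : Decidable (Spec_tokenize_word_py word vocab out) := by unfold Spec_tokenize_word_py; infer_instance

-- ===== CLAIM (what is proved, stated in full; the proofs are below) =====
def Claim_equal_tokenize_word_py : Prop := ∀ (word : String) (vocab : List (String × Int)), Dom_tokenize_word_py word vocab → Spec_tokenize_word_py word vocab (tokenize_word_py word vocab)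

-- ===== LEMMAS AND PROOFS =====

theorem pvStrip_eq_some (k c : List Char) : pvStrip k = some c ↔ k = '#' :: '#' :: c := by
  constructor
  · intro h; unfold pvStrip at h; split at h <;> simp_all
  · intro h; subst h; rfl

-- the cores list actually scanned at position i
def pvCoresAt (vocab : List (String × Int)) (i : Nat) : List (List Char) :=
  if i == 0 then vocab.map (fun p => p.1.toList) else vocab.filterMap (fun p => pvStrip p.1.toList)

-- A's candidate membership at position i with core sub ↔ sub is among the cores scanned by B
theorem pvMem_iff_core (vocab : List (String × Int)) (i : Nat) (sub : List Char) :
    pvMemVocab vocab (pvPre i ++ sub) = true ↔ sub ∈ pvCoresAt vocab i := by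
  unfold pvMemVocab pvCoresAt pvPre
  by_cases h0 : i = 0
  · simp [h0, List.any_eq_true, List.mem_map]
  · have hb : (i == 0) = false := by simp [h0]
    simp only [hb, Bool.false_eq_true, if_false, List.any_eq_true, beq_iff_eq,
      List.mem_filterMap]
    constructor
    · rintro ⟨p, hp, he⟩
      exact ⟨p, hp, (pvStrip_eq_some _ _).mpr he⟩
    · rintro ⟨p, hp, he⟩
      exact ⟨p, hp, (pvStrip_eq_some _ _).mp he⟩

-- invariant of B's inner fold: result ≥ the accumulator, dominates every matching core,
-- and is the accumulator or attained by a matching core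
theorem pvBest_fold (cs : List Char) (i : Nat) :
    ∀ (l : List (List Char)) (acc : Nat),
      acc ≤ l.foldl
          (fun best core =>
            if best < core.length && core.isPrefixOf (cs.drop i) then core.length else best) acc
      ∧ (∀ core ∈ l, core.isPrefixOf (cs.drop i) = true →
          core.length ≤ l.foldl
            (fun best core =>
              if best < core.length && core.isPrefixOf (cs.drop i) then core.length else best) acc)
      ∧ (l.foldl
            (fun best core =>
              if best < core.length && core.isPrefixOf (cs.drop i) then core.length else best) acc
            = acc
         ∨ ∃ core ∈ l, core.isPrefixOf (cs.drop i) = true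
             ∧ core.length = l.foldl
                (fun best core =>
                  if best < core.length && core.isPrefixOf (cs.drop i) then core.length else best) acc) := by
  intro l
  induction l with
  | nil => intro acc; simp
  | cons c t ih =>
    intro acc
    simp only [List.foldl_cons]
    by_cases hc : (acc < c.length && c.isPrefixOf (cs.drop i)) = true
    · rw [if_pos hc]
      obtain ⟨hca, hcb⟩ := Bool.and_eq_true_iff.mp hc
      have hca' : acc < c.length := of_decide_eq_true hca
      obtain ⟨h1, h2, h3⟩ := ih c.length
      refine ⟨by omega, ?_, ?_⟩
      · intro core hm hp
        rcases List.mem_cons.mp hm with h | h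
        · subst h; exact h1
        · exact h2 core h hp
      · rcases h3 with h | ⟨core, hm, hp, he⟩
        · exact Or.inr ⟨c, List.mem_cons_self .., hcb, h.symm⟩
        · exact Or.inr ⟨core, List.mem_cons_of_mem _ hm, hp, he⟩
    · rw [if_neg hc]
      obtain ⟨h1, h2, h3⟩ := ih acc
      refine ⟨h1, ?_, ?_⟩
      · intro core hm hp
        rcases List.mem_cons.mp hm with h | h
        · subst h
          rcases Bool.and_eq_false_iff.mp (Bool.eq_false_iff.mpr hc) with h' | h'
          · have hle : ¬ acc < core.length := fun hlt => absurd (decide_eq_true hlt) (by simp_all)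
            omega
          · rw [hp] at h'; exact absurd h' (by simp)
        · exact h2 core h hp
      · rcases h3 with h | ⟨core, hm, hp, he⟩
        · exact Or.inl h
        · exact Or.inr ⟨core, List.mem_cons_of_mem _ hm, hp, he⟩

-- the best match length never exceeds the remaining word
theorem pvBest_le (vocab : List (String × Int)) (cs : List Char) (i : Nat) :
    pvBest (pvCoresAt vocab i) cs i ≤ cs.length - i := by
  obtain ⟨_, _, h3⟩ := pvBest_fold cs i (pvCoresAt vocab i) 0
  rcases h3 with h | ⟨core, _, hp, he⟩
  · unfold pvBest; omega
  · unfold pvBest; rw [← he]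
    have := List.IsPrefix.length_le (List.isPrefixOf_iff_prefix.mp hp)
    simpa using this

-- A's descending search computes exactly B's best match, down from any bound ≥ i + best
theorem pvAFind_eq_best (vocab : List (String × Int)) (cs : List Char) (i : Nat) :
    ∀ j, i + pvBest (pvCoresAt vocab i) cs i ≤ j → j ≤ cs.length →
      pvAFind vocab cs i j =
        (if pvBest (pvCoresAt vocab i) cs i = 0 then none
         else some (pvPre i ++ (cs.drop i).take (pvBest (pvCoresAt vocab i) cs i),
                    i + pvBest (pvCoresAt vocab i) cs i)) := by
  set best := pvBest (pvCoresAt vocab i) cs i with hbest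
  obtain ⟨_, hmax, hatt⟩ := pvBest_fold cs i (pvCoresAt vocab i) 0
  intro j
  induction j using Nat.strong_induction_on with
  | _ j ih =>
    intro hlo hhi
    have hcand : ∀ m, (if 0 < i then '#' :: '#' :: (cs.drop i).take m else (cs.drop i).take m)
        = pvPre i ++ (cs.drop i).take m := by
      intro m; unfold pvPre
      rcases Nat.eq_zero_or_pos i with h | h
      · simp [h]
      · simp [Nat.pos_iff_ne_zero.mp h, h]
    rcases Nat.lt_or_ge (i + best) j with hgt | hle
    · -- j above the best match: the candidate there is too long to be a core, step down
      have hij : i < j := by omega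
      rw [pvAFind, dif_pos hij]
      dsimp only
      rw [hcand]
      have hnot : pvMemVocab vocab (pvPre i ++ (cs.drop i).take (j - i)) = false := by
        apply Bool.eq_false_iff.mpr
        intro hm
        have hc := (pvMem_iff_core vocab i _).mp hm
        have hlen : ((cs.drop i).take (j - i)).length = j - i := by
          simp only [List.length_take, List.length_drop]; omega
        have hpp : ((cs.drop i).take (j - i)).isPrefixOf (cs.drop i) = true :=
          List.isPrefixOf_iff_prefix.mpr (List.take_prefix _ _)
        have := hmax _ hc hpp
        rw [hlen] at this
        unfold pvBest at hbest
        omega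
      rw [hnot]
      simp only [Bool.false_eq_true, if_false]
      exact ih (j - 1) (by omega) (by omega) (by omega)
    · -- j = i + best
      have hj : j = i + best := by omega
      subst hj
      rcases Nat.eq_zero_or_pos best with hb0 | hbpos
      · rw [hb0]
        rw [pvAFind, dif_neg (by omega)]
        simp
      · have hij : i < i + best := by omega
        rw [pvAFind, dif_pos hij]
        dsimp only
        rw [hcand]
        have hmem : pvMemVocab vocab (pvPre i ++ (cs.drop i).take (i + best - i)) = true := by
          rcases hatt with h | ⟨core, hm, hp, he⟩
          · unfold pvBest at hbest; omega
          · have hcore : core = (cs.drop i).take (i + best - i) := by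
              have hpre := List.isPrefixOf_iff_prefix.mp hp
              have : core = (cs.drop i).take core.length := (List.prefix_iff_eq_take.mp hpre)
              rw [this]
              congr 1
              unfold pvBest at hbest
              omega
            rw [← hcore]
            exact (pvMem_iff_core vocab i core).mpr hm
        rw [hmem]
        simp only [if_true]
        rw [if_neg (by omega)]
        simp only [Nat.add_sub_cancel_left]

-- the two outer loops agree
theorem pvLoop_eq (vocab : List (String × Int)) (cs : List Char) :
    ∀ i tokens,
      pvALoop vocab cs tokens i =
        pvBLoop (vocab.map (fun p => p.1.toList)) (vocab.filterMap (fun p => pvStrip p.1.toList))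
          cs tokens i := by
  suffices H : ∀ m i tokens, cs.length - i ≤ m →
      pvALoop vocab cs tokens i =
        pvBLoop (vocab.map (fun p => p.1.toList)) (vocab.filterMap (fun p => pvStrip p.1.toList))
          cs tokens i by
    intro i tokens; exact H (cs.length - i) i tokens le_rfl
  intro m
  induction m with
  | zero =>
    intro i tokens hm
    rw [pvALoop, pvBLoop]
    have : ¬ i < cs.length := by omega
    simp [this]
  | succ m ih =>
    intro i tokens hm
    rw [pvALoop, pvBLoop]
    by_cases hin : i < cs.length
    · simp only [dif_pos hin]
      have hcores : (if i == 0 then vocab.map (fun p => p.1.toList)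
          else vocab.filterMap (fun p => pvStrip p.1.toList)) = pvCoresAt vocab i := by
        unfold pvCoresAt; rfl
      rw [hcores]
      have hbl := pvBest_le vocab cs i
      have hA := pvAFind_eq_best vocab cs i cs.length (by omega) le_rfl
      set best := pvBest (pvCoresAt vocab i) cs i with hbest
      rcases Nat.eq_zero_or_pos best with hb0 | hbpos
      · rw [if_pos hb0] at hA
        rw [dif_neg (by omega : ¬ 0 < best)]
        split
        · rename_i s k heq; rw [heq] at hA; exact absurd hA (by simp)
        · exact ih _ _ (by omega)
      · rw [if_neg (by omega)] at hA
        rw [dif_pos hbpos]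
        split
        · rename_i s k heq
          rw [heq] at hA
          obtain ⟨hs, hk⟩ := Prod.mk.injEq .. ▸ Option.some.inj hA
          rw [hs, hk]
          exact ih _ _ (by omega)
        · rename_i heq; rw [heq] at hA; exact absurd hA (by simp)
    · simp [hin]

-- ===== VERDICT (by name: the statement is the Claim_ definition above) =====
theorem tokenize_word_py_spec : Claim_equal_tokenize_word_py := by
  intro word vocab _
  unfold Spec_tokenize_word_py tokenize_word_py tokenize_word_py_alt
  rw [pvLoop_eq]
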